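-- pv_equiv track=rewrite | github.com/UrielMarles/PPLAB1G_RECU | FuncionesValidaciones.py | comparar_listas_numero_a_numero
-- ===== SOURCE A (Python) =====
-- def comparar_listas_numero_a_numero(lista1:list,lista2:list,modo:str = "menor") -> list:
--     largoL1 = len(lista1)
--     largoL2 = len(lista2)
--     masCorta = lista2
--     lenCorto = len(lista2)
--     if largoL1 < largoL2:
--         masCorta = lista1
--         lenCorto = len(lista1)
--     for i in range(0,lenCorto):
--         if (lista1[i] < lista2[i] and modo == "menor") or (lista1[i] > lista2[i] and modo == "mayor"):
--             return lista1
--         if (lista2[i] < lista1[i] and modo == "menor") or (lista2[i] > lista1[i] and modo == "mayor"):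
--             return lista2
--     return masCorta
-- ===== SOURCE B (Python) =====
-- def comparar_listas_numero_a_numero(lista1: list, lista2: list, modo: str = "menor") -> list:
--     n = min(len(lista1), len(lista2))
--     p1 = lista1[:n]
--     p2 = lista2[:n]
--     default = lista1 if len(lista1) < len(lista2) else lista2
--     if modo == "menor":
--         if p1 < p2:
--             return lista1
--         if p2 < p1:
--             return lista2
--     elif modo == "mayor":
--         if p2 < p1:
--             return lista1
--         if p1 < p2:
--             return lista2
--     return default
-- ===== Notes on version B (the rewrite author's own statement) =====
-- stated objective: simpler
-- what changed: Replaces A's explicit index loop with per-element mode checks by one built-in lexicographic comparison of the equal-length prefixes, then a three-way branch per mode.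
import Mathlib
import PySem

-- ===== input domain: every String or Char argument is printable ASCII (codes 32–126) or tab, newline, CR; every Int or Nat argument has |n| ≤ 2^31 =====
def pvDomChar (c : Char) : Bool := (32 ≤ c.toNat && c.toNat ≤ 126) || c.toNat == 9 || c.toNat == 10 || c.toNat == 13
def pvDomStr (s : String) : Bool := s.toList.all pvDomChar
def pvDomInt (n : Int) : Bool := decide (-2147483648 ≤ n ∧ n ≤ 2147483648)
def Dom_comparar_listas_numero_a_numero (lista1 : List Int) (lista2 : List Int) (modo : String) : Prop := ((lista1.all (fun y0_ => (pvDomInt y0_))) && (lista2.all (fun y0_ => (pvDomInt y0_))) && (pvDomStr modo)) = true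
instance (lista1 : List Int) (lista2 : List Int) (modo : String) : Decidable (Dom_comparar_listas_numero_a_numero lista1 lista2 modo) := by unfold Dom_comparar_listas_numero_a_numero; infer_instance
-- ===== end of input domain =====

-- B replaces A's index loop with one lexicographic comparison of the equal-length prefixes (simpler).

-- ===== PORT A =====
-- the 'for i in range(0, lenCorto)' loop with its two early returns
def compLoopA (lista1 : List Int) (lista2 : List Int) (modo : String) (masCorta : List Int) :
    List Int → List Int
  | [] => masCorta
  | i :: rest =>
    let x1 := PySem.List.pyGetD lista1 i 0
    let x2 := PySem.List.pyGetD lista2 i 0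
    if (x1 < x2 && modo == "menor") || (x1 > x2 && modo == "mayor") then lista1
    else if (x2 < x1 && modo == "menor") || (x2 > x1 && modo == "mayor") then lista2
    else compLoopA lista1 lista2 modo masCorta rest

def comparar_listas_numero_a_numero (lista1 : List Int) (lista2 : List Int) (modo : String) : List Int :=
  let largoL1 : Int := lista1.length
  let largoL2 : Int := lista2.length
  let masCorta := if largoL1 < largoL2 then lista1 else lista2
  let lenCorto := if largoL1 < largoL2 then largoL1 else largoL2
  compLoopA lista1 lista2 modo masCorta (PySem.List.pyRange 0 lenCorto 1)

-- ===== PORT B =====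
-- Python's built-in '<' on lists of ints (lexicographic)
def lexLt : List Int → List Int → Bool
  | [], [] => false
  | [], _ :: _ => true
  | _ :: _, [] => false
  | a :: as, b :: bs => a < b || (a == b && lexLt as bs)

def comparar_listas_numero_a_numero_alt (lista1 : List Int) (lista2 : List Int) (modo : String) : List Int :=
  let n := min lista1.length lista2.length
  let p1 := lista1.take n
  let p2 := lista2.take n
  let dflt := if lista1.length < lista2.length then lista1 else lista2
  if modo == "menor" then
    if lexLt p1 p2 then lista1 else if lexLt p2 p1 then lista2 else dflt
  else if modo == "mayor" then
    if lexLt p2 p1 then lista1 else if lexLt p1 p2 then lista2 else dflt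
  else dflt

-- ===== PRECONDITION & SPEC =====
def Spec_comparar_listas_numero_a_numero (lista1 : List Int) (lista2 : List Int) (modo : String) (out : List Int) : Prop := out = comparar_listas_numero_a_numero_alt lista1 lista2 modo
instance (lista1 : List Int) (lista2 : List Int) (modo : String) (out : List Int) : Decidable (Spec_comparar_listas_numero_a_numero lista1 lista2 modo out) := by unfold Spec_comparar_listas_numero_a_numero; infer_instance

-- ===== CLAIM (what is proved, stated in full; the proofs are below) =====
def Claim_equal_comparar_listas_numero_a_numero : Prop := ∀ (lista1 : List Int) (lista2 : List Int) (modo : String), Dom_comparar_listas_numero_a_numero lista1 lista2 modo → Spec_comparar_listas_numero_a_numero lista1 lista2 modo (comparar_listas_numero_a_numero lista1 lista2 modo)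

-- ===== LEMMAS AND PROOFS =====

-- the loop over indices i, i+1, …, i+k-1 computes the prefix comparison of the drops
theorem compLoopA_eq (l1 l2 : List Int) (modo : String) (mc : List Int) :
    ∀ (k i : Nat), i + k ≤ l1.length → i + k ≤ l2.length →
    compLoopA l1 l2 modo mc (PySem.List.pyRange (i : Int) ((i : Int) + (k : Int)) 1) =
      (let p1 := (l1.drop i).take k
       let p2 := (l2.drop i).take k
       if modo == "menor" then
         if lexLt p1 p2 then l1 else if lexLt p2 p1 then l2 else mc
       else if modo == "mayor" then
         if lexLt p2 p1 then l1 else if lexLt p1 p2 then l2 else mc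
       else mc) := by
  intro k
  induction k with
  | zero =>
    intro i _ _
    rw [show ((i : Int) + (0 : Nat) = (i : Int)) by push_cast; ring,
        PySem.List.pyRange_one_eq_nil (le_refl _)]
    simp [compLoopA, lexLt]
  | succ k ih =>
    intro i h1 h2
    have hi1 : i < l1.length := by omega
    have hi2 : i < l2.length := by omega
    rw [PySem.List.pyRange_one_cons (by push_cast; omega)]
    have hd1 : l1.drop i = l1[i] :: l1.drop (i + 1) := (List.getElem_cons_drop hi1).symm
    have hd2 : l2.drop i = l2[i] :: l2.drop (i + 1) := (List.getElem_cons_drop hi2).symm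
    have hg1 : PySem.List.pyGetD l1 (i : Int) 0 = l1[i] := by
      simp [PySem.List.pyGetD, PySem.List.pyGet?, PySem.List.pyIdx?, hi1]
    have hg2 : PySem.List.pyGetD l2 (i : Int) 0 = l2[i] := by
      simp [PySem.List.pyGetD, PySem.List.pyGet?, PySem.List.pyIdx?, hi2]
    have hrange : (i : Int) + 1 + (k : Int) = (i : Int) + ((k : Nat) + 1 : Nat) := by
      push_cast; ring
    have ihx := ih (i + 1) (by omega) (by omega)
    rw [show ((i : Int) + 1 = ((i + 1 : Nat) : Int)) by push_cast; ring] at *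
    rw [hrange] at ihx
    simp only [compLoopA, hg1, hg2, ihx, hd1, hd2, List.take_succ_cons, lexLt]
    by_cases hm1 : modo == "menor" <;> by_cases hm2 : modo == "mayor"
    · rw [beq_iff_eq.mp hm1] at hm2; exact absurd hm2 (by decide)
    all_goals
      rcases lt_trichotomy l1[i] l2[i] with h | h | h <;>
        simp [hm1, hm2, h, not_lt_of_gt] <;>
        omega

theorem comparar_listas_numero_a_numero_spec : Claim_equal_comparar_listas_numero_a_numero := by
  intro l1 l2 modo _
  unfold Spec_comparar_listas_numero_a_numero comparar_listas_numero_a_numero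
    comparar_listas_numero_a_numero_alt
  by_cases hlt : l1.length < l2.length
  · have hI : (l1.length : Int) < (l2.length : Int) := by exact_mod_cast hlt
    have hmin : min l1.length l2.length = l1.length := by omega
    have key := compLoopA_eq l1 l2 modo l1 l1.length 0 (by omega) (by omega)
    simp only [Nat.cast_zero, zero_add, List.drop_zero] at key
    simp only [if_pos hI, if_pos hlt, hmin, List.take_length]
    rw [key]
    simp
  · have hI : ¬ (l1.length : Int) < (l2.length : Int) := by exact_mod_cast hlt
    have hmin : min l1.length l2.length = l2.length := by omega
    have key := compLoopA_eq l1 l2 modo l2 l2.length 0 (by omega) (by omega)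
    simp only [Nat.cast_zero, zero_add, List.drop_zero] at key
    simp only [if_neg hI, if_neg hlt, hmin, List.take_length]
    rw [key]
    simp
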